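-- pv_equiv track=rewrite | github.com/JoachimVeulemans/PXL-DIGITAL | PXL_DIGITAL_JAAR_2/AI & Robotics/Week 3/Exercises/solutions/connect4/board.py | checkForPattern
-- ===== SOURCE A (Python) =====
-- def checkForPattern(area, turn):
--     count = 0
--     start = -1
--     i = 0
--     for piece in area:
--         if piece == turn:
--             if count == 0:
--                 start = i
--             count += 1
--         else:
--             count = 0
--         if count == 4:
--             return start
--         i += 1
--     return -1
-- ===== SOURCE B (Python) =====
-- def checkForPattern(area, turn):
--     for i in range(len(area) - 3):
--         if area[i] == turn and area[i + 1] == turn and area[i + 2] == turn and area[i + 3] == turn: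
--             return i
--     return -1
-- ===== Notes on version B (the rewrite author's own statement) =====
-- stated objective: simpler
-- what changed: Replaces the running counter/start run-tracking state machine with a stateless sliding-window scan over starting indices, returning the first index whose 4-element window all equals turn.
import Mathlib
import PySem

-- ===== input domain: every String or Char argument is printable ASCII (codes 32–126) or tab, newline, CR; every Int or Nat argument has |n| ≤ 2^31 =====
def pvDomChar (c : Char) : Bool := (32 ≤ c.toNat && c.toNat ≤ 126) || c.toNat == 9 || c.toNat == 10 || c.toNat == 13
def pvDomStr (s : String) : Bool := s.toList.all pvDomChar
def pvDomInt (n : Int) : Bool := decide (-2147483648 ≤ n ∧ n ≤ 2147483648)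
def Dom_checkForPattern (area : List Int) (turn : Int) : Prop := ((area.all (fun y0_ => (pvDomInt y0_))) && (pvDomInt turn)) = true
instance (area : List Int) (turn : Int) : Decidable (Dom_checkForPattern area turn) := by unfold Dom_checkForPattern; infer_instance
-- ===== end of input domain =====

-- B replaces A's running counter/start state machine by a stateless sliding-window
-- scan over starting indices (simpler; same value everywhere).

-- ===== PORT A =====
-- A's for-loop with early return, as structural recursion over the same state (count, start, i).
def checkForPatternGo (turn : Int) : List Int → Int → Int → Int → Int
  | [], _, _, _ => -1
  | piece :: rest, count, start, i =>
    let start' := if piece == turn then (if count == 0 then i else start) else start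
    let count' := if piece == turn then count + 1 else 0
    if count' == 4 then start' else checkForPatternGo turn rest count' start' (i + 1)

def checkForPattern (area : List Int) (turn : Int) : Int :=
  checkForPatternGo turn area 0 (-1) 0

-- ===== PORT B =====
-- B's 'for i in range(len(area)-3)' with early return; area[i+j] is always in range,
-- ported as pyGetD with default 0 (exact on these in-range indices).
def checkForPatternAltGo (area : List Int) (turn : Int) : List Int → Int
  | [] => -1
  | k :: ks =>
    if PySem.List.pyGetD area k 0 == turn && PySem.List.pyGetD area (k + 1) 0 == turn
        && PySem.List.pyGetD area (k + 2) 0 == turn && PySem.List.pyGetD area (k + 3) 0 == turn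
    then k
    else checkForPatternAltGo area turn ks

def checkForPattern_alt (area : List Int) (turn : Int) : Int :=
  checkForPatternAltGo area turn (PySem.List.pyRange 0 ((area.length : Int) - 3) 1)

-- ===== PRECONDITION & SPEC =====
def Spec_checkForPattern (area : List Int) (turn : Int) (out : Int) : Prop := out = checkForPattern_alt area turn
instance (area : List Int) (turn : Int) (out : Int) : Decidable (Spec_checkForPattern area turn out) := by unfold Spec_checkForPattern; infer_instance

-- ===== CLAIM (what is proved, stated in full; the proofs are below) =====
def Claim_equal_checkForPattern : Prop := ∀ (area : List Int) (turn : Int), Dom_checkForPattern area turn → Spec_checkForPattern area turn (checkForPattern area turn)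

-- ===== LEMMAS AND PROOFS =====

-- Reference: first index of an all-turn 4-window, by structural sliding window.
def pvRef (turn : Int) : List Int → Int → Int
  | [], _ => -1
  | a :: l, i =>
    match l with
    | b :: c :: d :: _ =>
      if a = turn ∧ b = turn ∧ c = turn ∧ d = turn then i else pvRef turn l (i + 1)
    | _ => -1

theorem pvRef_short (turn : Int) (l : List Int) (i : Int) (h : l.length ≤ 3) :
    pvRef turn l i = -1 := by
  rcases l with _ | ⟨a, _ | ⟨b, _ | ⟨c, _ | ⟨d, r⟩⟩⟩⟩
  · rfl
  · rfl
  · rfl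
  · rfl
  · simp at h; omega

theorem pvRef_cons4 (turn a b c d : Int) (r : List Int) (i : Int) :
    pvRef turn (a :: b :: c :: d :: r) i
      = if a = turn ∧ b = turn ∧ c = turn ∧ d = turn then i
        else pvRef turn (b :: c :: d :: r) (i + 1) := rfl

theorem pvRef_skip1 (turn p : Int) (rest : List Int) (i : Int) (hp : p ≠ turn) :
    pvRef turn (p :: rest) i = pvRef turn rest (i + 1) := by
  rcases rest with _ | ⟨a, _ | ⟨b, _ | ⟨c, r⟩⟩⟩
  · rfl
  · rfl
  · rfl
  · rw [pvRef_cons4, if_neg (by tauto)]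

theorem pvRef_skip2 (turn x p : Int) (rest : List Int) (i : Int) (hp : p ≠ turn) :
    pvRef turn (x :: p :: rest) i = pvRef turn rest (i + 2) := by
  rcases rest with _ | ⟨a, _ | ⟨b, r⟩⟩
  · rfl
  · rfl
  · rw [pvRef_cons4, if_neg (by tauto), pvRef_skip1 turn p _ _ hp]
    ring_nf

theorem pvRef_skip3 (turn x y p : Int) (rest : List Int) (i : Int) (hp : p ≠ turn) :
    pvRef turn (x :: y :: p :: rest) i = pvRef turn rest (i + 3) := by
  rcases rest with _ | ⟨a, r⟩
  · rfl
  · rw [pvRef_cons4, if_neg (by tauto), pvRef_skip2 turn y p _ _ hp]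
    ring_nf

theorem pvRef_skip4 (turn x y z p : Int) (rest : List Int) (i : Int) (hp : p ≠ turn) :
    pvRef turn (x :: y :: z :: p :: rest) i = pvRef turn rest (i + 4) := by
  rw [pvRef_cons4, if_neg (by tauto), pvRef_skip3 turn y z p _ _ hp]
  ring_nf

theorem goA_cons (turn piece : Int) (rest : List Int) (count start i : Int) :
    checkForPatternGo turn (piece :: rest) count start i
      = if (if piece == turn then count + 1 else 0) == 4
        then (if piece == turn then (if count == 0 then i else start) else start)
        else checkForPatternGo turn rest (if piece == turn then count + 1 else 0)
              (if piece == turn then (if count == 0 then i else start) else start) (i + 1) := rfl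

-- A's run-tracking loop computes pvRef: count ≤ 3 is the current run length,
-- and start = i - count while a run is open.
theorem goA_eq_ref (turn : Int) (rest : List Int) :
    ∀ (count : Nat) (start i : Int), count ≤ 3 → (0 < count → start = i - count) →
      checkForPatternGo turn rest (count : Int) start i
        = pvRef turn (List.replicate count turn ++ rest) (i - count) := by
  induction rest with
  | nil =>
    intro count start i hc _
    rw [show checkForPatternGo turn [] (count : Int) start i = -1 from rfl]
    rw [pvRef_short turn _ _ (by simpa using hc)]
  | cons piece rest ih =>
    intro count start i hc hs
    by_cases hp : piece = turn
    · rw [hp]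
      rw [goA_cons]
      interval_cases count
      · have h1 := ih 1 i (i + 1) (by omega) (by intro _; push_cast; ring)
        push_cast at h1 ⊢
        simp only [List.nil_append, List.cons_append] at h1 ⊢
        norm_num at h1 ⊢
        ring_nf at h1 ⊢
        exact h1
      · have h1 := ih 2 start (i + 1) (by omega)
          (by intro _; have hs1 := hs (by omega); push_cast at hs1 ⊢; omega)
        push_cast at h1 ⊢
        simp only [List.nil_append, List.cons_append] at h1 ⊢
        norm_num at h1 ⊢
        ring_nf at h1 ⊢
        exact h1
      · have h1 := ih 3 start (i + 1) (by omega)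
          (by intro _; have hs1 := hs (by omega); push_cast at hs1 ⊢; omega)
        push_cast at h1 ⊢
        simp only [List.nil_append, List.cons_append] at h1 ⊢
        norm_num at h1 ⊢
        ring_nf at h1 ⊢
        exact h1
      · have hs1 := hs (by omega)
        push_cast at hs1 ⊢
        norm_num
        rw [pvRef_cons4, if_pos (by tauto)]
        omega
    · rw [goA_cons, if_neg (by simp [hp]), if_neg (by simp [hp]), if_neg (by simp [hp])]
      have h0 := ih 0 start (i + 1) (by omega) (by omega)
      push_cast at h0
      simp only [List.nil_append, sub_zero] at h0
      rw [h0]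
      interval_cases count
      · simp only [List.replicate_zero, List.nil_append, Nat.cast_zero, sub_zero]
        rw [pvRef_skip1 turn piece rest _ hp]
      · rw [show List.replicate 1 turn ++ piece :: rest = turn :: piece :: rest from by simp]
        rw [pvRef_skip2 turn turn piece rest _ hp]
        ring_nf
      · rw [show List.replicate 2 turn ++ piece :: rest
            = turn :: turn :: piece :: rest from by simp [List.replicate_succ]]
        rw [pvRef_skip3 turn turn turn piece rest _ hp]
        push_cast; ring_nf
      · rw [show List.replicate 3 turn ++ piece :: rest
            = turn :: turn :: turn :: piece :: rest from by simp [List.replicate_succ]]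
        rw [pvRef_skip4 turn turn turn turn piece rest _ hp]
        push_cast; ring_nf

-- B's index scan computes pvRef on the remaining suffix.
theorem goB_eq_ref (area : List Int) (turn : Int) :
    ∀ (fuel m : Nat), area.length ≤ m + fuel →
      checkForPatternAltGo area turn
          (PySem.List.pyRange (m : Int) ((area.length : Int) - 3) 1)
        = pvRef turn (area.drop m) (m : Int) := by
  intro fuel
  induction fuel with
  | zero =>
    intro m hm
    simp only [Nat.add_zero] at hm
    rw [PySem.List.pyRange_one_eq_nil (by push_cast; omega)]
    rw [pvRef_short turn _ _ (by simp; omega)]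
    rfl
  | succ fuel ih =>
    intro m hm
    by_cases hlt : (m : Int) < (area.length : Int) - 3
    · have hm3 : m + 3 < area.length := by omega
      rw [PySem.List.pyRange_one_cons hlt]
      have g0 : PySem.List.pyGetD area (m : Int) 0 = area[m]'(by omega) := by
        rw [PySem.List.pyGetD_natCast, List.getD_eq_getElem area 0 (by omega)]
      have g1 : PySem.List.pyGetD area ((m : Int) + 1) 0 = area[m + 1]'(by omega) := by
        rw [show ((m : Int) + 1) = ((m + 1 : Nat) : Int) from by push_cast; ring]
        rw [PySem.List.pyGetD_natCast, List.getD_eq_getElem area 0 (by omega)]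
      have g2 : PySem.List.pyGetD area ((m : Int) + 2) 0 = area[m + 2]'(by omega) := by
        rw [show ((m : Int) + 2) = ((m + 2 : Nat) : Int) from by push_cast; ring]
        rw [PySem.List.pyGetD_natCast, List.getD_eq_getElem area 0 (by omega)]
      have g3 : PySem.List.pyGetD area ((m : Int) + 3) 0 = area[m + 3]'(by omega) := by
        rw [show ((m : Int) + 3) = ((m + 3 : Nat) : Int) from by push_cast; ring]
        rw [PySem.List.pyGetD_natCast, List.getD_eq_getElem area 0 (by omega)]
      rw [show checkForPatternAltGo area turn
            ((m : Int) :: PySem.List.pyRange ((m : Int) + 1) ((area.length : Int) - 3) 1)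
          = if PySem.List.pyGetD area (m : Int) 0 == turn
                && PySem.List.pyGetD area ((m : Int) + 1) 0 == turn
                && PySem.List.pyGetD area ((m : Int) + 2) 0 == turn
                && PySem.List.pyGetD area ((m : Int) + 3) 0 == turn
            then (m : Int)
            else checkForPatternAltGo area turn
                  (PySem.List.pyRange ((m : Int) + 1) ((area.length : Int) - 3) 1) from rfl]
      rw [List.drop_eq_getElem_cons (show m < area.length by omega),
          List.drop_eq_getElem_cons (show m + 1 < area.length by omega),
          List.drop_eq_getElem_cons (show m + 2 < area.length by omega),
          List.drop_eq_getElem_cons (show m + 3 < area.length by omega)]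
      rw [pvRef_cons4, g0, g1, g2, g3]
      by_cases hcond : area[m]'(by omega) = turn ∧ area[m + 1]'(by omega) = turn
          ∧ area[m + 2]'(by omega) = turn ∧ area[m + 3]'(by omega) = turn
      · rw [if_pos (by simp [hcond.1, hcond.2.1, hcond.2.2.1, hcond.2.2.2]), if_pos hcond]
      · rw [if_neg (by
            intro h
            simp only [Bool.and_eq_true, beq_iff_eq] at h
            exact hcond ⟨h.1.1.1, h.1.1.2, h.1.2, h.2⟩),
          if_neg hcond]
        have h1 := ih (m + 1) (by omega)
        push_cast at h1
        rw [h1]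
        rw [List.drop_eq_getElem_cons (show m + 1 < area.length by omega),
            List.drop_eq_getElem_cons (show m + 2 < area.length by omega),
            List.drop_eq_getElem_cons (show m + 3 < area.length by omega)]
    · rw [PySem.List.pyRange_one_eq_nil (by omega)]
      rw [pvRef_short turn _ _ (by simp; omega)]
      rfl

-- ===== VERDICT (by name: the statement is the Claim_ definition above) =====
theorem checkForPattern_spec : Claim_equal_checkForPattern := by
  intro area turn _
  unfold Spec_checkForPattern checkForPattern checkForPattern_alt
  have hA := goA_eq_ref turn area 0 (-1) 0 (by omega) (by omega)
  have hB := goB_eq_ref area turn area.length 0 (by omega)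
  simp only [Nat.cast_zero, List.replicate_zero, List.nil_append, List.drop_zero,
    sub_zero] at hA hB
  rw [hA, hB]
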